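-- pv_equiv track=rewrite | github.com/Tobbse/serena-haxe | src/solidlsp/language_servers/haxe_language_server.py | _find_method_end
-- ===== SOURCE A (Python) =====
-- def _find_method_end(lines: list[str], start_line: int) -> int | None:
--     """Find the actual end line of a method by counting brace depth,
--     skipping string literals and comments.
--     """
--     depth = 0
--     found_opening = False
--     in_string: str | None = None  # None, '"', or "'"
--     in_block_comment = False
--
--     for i in range(start_line, len(lines)):
--         line = lines[i]
--         j = 0
--         while j < len(line):
--             # Block comment
--             if in_block_comment:
--                 if line[j : j + 2] == "*/":
--                     in_block_comment = False
--                     j += 2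
--                     continue
--                 j += 1
--                 continue
--
--             # Line comment
--             if line[j : j + 2] == "//":
--                 break  # Rest of line is comment
--
--             # Block comment start
--             if line[j : j + 2] == "/*":
--                 in_block_comment = True
--                 j += 2
--                 continue
--
--             # String handling
--             if in_string:
--                 if line[j] == "\\":
--                     j += 2  # Skip escaped char
--                     continue
--                 if line[j] == in_string:
--                     in_string = None
--                 j += 1
--                 continue
--
--             if line[j] in ('"', "'"):
--                 in_string = line[j]
--                 j += 1
--                 continue
--
--             # Brace counting
--             if line[j] == "{":
--                 depth += 1
--                 found_opening = True
--             elif line[j] == "}":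
--                 depth -= 1
--                 if found_opening and depth == 0:
--                     return i
--
--             j += 1
--
--     return None
-- ===== SOURCE B (Python) =====
-- # B: two-pass decomposition — lex once into masked lines (strings/comments blanked out),
-- # then count brace depth over the masked lines.  Same result; objective: alternative/simpler structure.
--
-- def _mask_lines(lines):
--     """First pass: lexer.  Return copies of the lines containing only the code
--     characters (string-literal and comment content removed), carrying the
--     open-string / open-block-comment state across lines."""
--     masked = []
--     in_string = None
--     in_block_comment = False
--     for line in lines:
--         buf = []
--         j = 0
--         n = len(line)
--         while j < n:
--             two = line[j : j + 2]
--             if in_block_comment: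
--                 if two == "*/":
--                     in_block_comment = False
--                     j += 2
--                 else:
--                     j += 1
--             elif two == "//":
--                 break
--             elif two == "/*":
--                 in_block_comment = True
--                 j += 2
--             elif in_string:
--                 if line[j] == "\\":
--                     j += 2
--                 else:
--                     if line[j] == in_string:
--                         in_string = None
--                     j += 1
--             elif line[j] in ('"', "'"):
--                 in_string = line[j]
--                 j += 1
--             else:
--                 buf.append(line[j])
--                 j += 1
--         masked.append("".join(buf))
--     return masked
--
--
-- def _find_method_end(lines: list[str], start_line: int) -> int | None:
--     """Second pass: pure brace counting over the masked code."""
--     depth = 0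
--     found_opening = False
--     for k, line in enumerate(_mask_lines(lines[start_line:])):
--         for ch in line:
--             if ch == "{":
--                 depth += 1
--                 found_opening = True
--             elif ch == "}":
--                 depth -= 1
--                 if found_opening and depth == 0:
--                     return start_line + k
--     return None
-- ===== Notes on version B (the rewrite author's own statement) =====
-- stated objective: alternative
-- what changed: Replaces A's fused single state machine (depth counting interleaved with string/comment lexing) by two separate passes: a lexer that emits masked lines containing only code characters, then a plain brace-depth counter over the masked lines.
-- outside the precondition, e.g. on _find_method_end(['}', '{'], -1): A returns 0, B returns None
import Mathlib
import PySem

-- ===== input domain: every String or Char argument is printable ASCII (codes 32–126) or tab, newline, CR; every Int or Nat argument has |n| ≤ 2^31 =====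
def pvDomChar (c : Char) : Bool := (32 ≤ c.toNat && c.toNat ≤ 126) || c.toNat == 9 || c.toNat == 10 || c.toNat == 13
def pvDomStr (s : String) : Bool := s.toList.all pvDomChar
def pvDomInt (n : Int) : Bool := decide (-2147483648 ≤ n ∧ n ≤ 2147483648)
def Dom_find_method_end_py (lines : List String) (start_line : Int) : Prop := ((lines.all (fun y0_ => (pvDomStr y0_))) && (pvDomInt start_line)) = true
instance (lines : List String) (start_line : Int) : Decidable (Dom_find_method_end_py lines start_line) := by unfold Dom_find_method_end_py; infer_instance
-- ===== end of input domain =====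

-- B replaces A's fused lex-and-count state machine by two passes (mask strings/comments, then count braces); return values only, objective: alternative structure.

-- ===== PORT A =====
-- result of A's inner while-loop over one line: early `return i` or fall through with the updated state
inductive PvScanRes where
  | ret : Int → PvScanRes
  | cont : Int → Bool → Option Char → Bool → PvScanRes
deriving DecidableEq, Repr

-- A's inner `while j < len(line)` loop, structural on the remaining characters
def pvScanA : List Char → Int → Int → Bool → Option Char → Bool → PvScanRes
  | [], _, d, f, s, b => .cont d f s b
  | c :: rest, i, d, f, s, b =>
    if b then
      if c = '*' ∧ rest.head? = some '/' then pvScanA rest.tail i d f s false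
      else pvScanA rest i d f s true
    else if c = '/' ∧ rest.head? = some '/' then .cont d f s b
    else if c = '/' ∧ rest.head? = some '*' then pvScanA rest.tail i d f s true
    else match s with
      | some q =>
        if c = '\\' then pvScanA rest.tail i d f (some q) b
        else if c = q then pvScanA rest i d f none b
        else pvScanA rest i d f (some q) b
      | none =>
        if c = '"' ∨ c = '\'' then pvScanA rest i d f (some c) b
        else if c = '{' then pvScanA rest i (d + 1) true s b
        else if c = '}' then
          if f ∧ d - 1 = 0 then .ret i
          else pvScanA rest i (d - 1) f s b
        else pvScanA rest i d f s b
termination_by cs => cs.length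
decreasing_by all_goals simp [List.length_tail]

-- A's outer `for i in range(start_line, len(lines))` loop
def pvOuterA (lines : List String) : List Int → Int → Bool → Option Char → Bool → Option Int
  | [], _, _, _, _ => none
  | i :: is, d, f, s, b =>
    match PySem.List.pyGet? lines i with
    | none => none   -- IndexError (only reachable outside Pre_)
    | some line =>
      match pvScanA line.toList i d f s b with
      | .ret r => some r
      | .cont d' f' s' b' => pvOuterA lines is d' f' s' b'

def find_method_end_py (lines : List String) (start_line : Int) : Option Int :=
  pvOuterA lines (PySem.List.pyRange start_line (lines.length : Int) 1) 0 false none false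

-- ===== PORT B =====
-- first pass: mask one line, returning the kept code characters and the lexer state after the line
def pvMaskLine : List Char → Option Char → Bool → List Char × Option Char × Bool
  | [], s, b => ([], s, b)
  | c :: rest, s, b =>
    if b then
      if c = '*' ∧ rest.head? = some '/' then pvMaskLine rest.tail s false
      else pvMaskLine rest s true
    else if c = '/' ∧ rest.head? = some '/' then ([], s, b)
    else if c = '/' ∧ rest.head? = some '*' then pvMaskLine rest.tail s true
    else match s with
      | some q =>
        if c = '\\' then pvMaskLine rest.tail (some q) b
        else if c = q then pvMaskLine rest none b
        else pvMaskLine rest (some q) b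
      | none =>
        if c = '"' ∨ c = '\'' then pvMaskLine rest (some c) b
        else
          let r := pvMaskLine rest none b
          (c :: r.1, r.2)
termination_by cs => cs.length
decreasing_by all_goals simp [List.length_tail]

def pvMaskLines : List String → Option Char → Bool → List (List Char)
  | [], _, _ => []
  | l :: ls, s, b =>
    let r := pvMaskLine l.toList s b
    r.1 :: pvMaskLines ls r.2.1 r.2.2

-- second pass: brace counting on one masked line; `none` = method end found here
def pvCountLine : List Char → Int → Bool → Option (Int × Bool)
  | [], d, f => some (d, f)
  | c :: rest, d, f =>
    if c = '{' then pvCountLine rest (d + 1) true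
    else if c = '}' then
      if f ∧ d - 1 = 0 then none
      else pvCountLine rest (d - 1) f
    else pvCountLine rest d f

def pvCountLines : List (List Char) → Int → Int → Bool → Option Int
  | [], _, _, _ => none
  | m :: ms, k, d, f =>
    match pvCountLine m d f with
    | none => some k
    | some r => pvCountLines ms (k + 1) r.1 r.2

def find_method_end_py_alt (lines : List String) (start_line : Int) : Option Int :=
  pvCountLines (pvMaskLines (PySem.List.slice lines (some start_line) none) none false) start_line 0 false

-- ===== PRECONDITION & SPEC =====
-- Pre_ excludes negative start_line (outside the natural domain of a line index): there A rescans trailing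
-- lines via Python's negative-index wraparound (and raises IndexError below -len(lines)), which B's natural
-- slice lines[start_line:] does not mimic.
def Pre_find_method_end_py (_lines : List String) (start_line : Int) : Prop := 0 ≤ start_line
instance (lines : List String) (start_line : Int) : Decidable (Pre_find_method_end_py lines start_line) := by unfold Pre_find_method_end_py; infer_instance

def pvWitness_find_method_end_py : List String × Int := (["void f() {", "  x = \"}\";", "}"], 0)

def Spec_find_method_end_py (lines : List String) (start_line : Int) (out : Option Int) : Prop := out = find_method_end_py_alt lines start_line
instance (lines : List String) (start_line : Int) (out : Option Int) : Decidable (Spec_find_method_end_py lines start_line out) := by unfold Spec_find_method_end_py; infer_instance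

-- ===== CLAIM (what is proved, stated in full; the proofs are below) =====
def Claim_equal_find_method_end_py : Prop := ∀ (lines : List String) (start_line : Int), Dom_find_method_end_py lines start_line → Pre_find_method_end_py lines start_line → Spec_find_method_end_py lines start_line (find_method_end_py lines start_line)

-- ===== LEMMAS AND PROOFS =====

-- per line: A's fused scan equals masking followed by counting
theorem pvScanA_eq_mask_count (cs : List Char) (s : Option Char) (b : Bool) :
    ∀ (i d : Int) (f : Bool),
    pvScanA cs i d f s b =
      match pvCountLine (pvMaskLine cs s b).1 d f with
      | none => .ret i
      | some r => .cont r.1 r.2 (pvMaskLine cs s b).2.1 (pvMaskLine cs s b).2.2 := by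
  induction cs, s, b using pvMaskLine.induct with
  | case1 s b => intro i d f; simp [pvScanA, pvMaskLine, pvCountLine]
  | case2 c rest s h ih =>
    intro i d f
    rw [pvScanA.eq_def, pvMaskLine.eq_def]; simp [h, ih i d f]
  | case3 c rest s h ih =>
    intro i d f
    rw [pvScanA.eq_def, pvMaskLine.eq_def]; simp [h, ih i d f]
  | case4 c rest s b hb h =>
    intro i d f
    simp only [Bool.not_eq_true] at hb; subst hb
    rw [pvScanA.eq_def, pvMaskLine.eq_def]; simp [h, pvCountLine]
  | case5 c rest s b hb h1 h2 ih =>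
    intro i d f
    simp only [Bool.not_eq_true] at hb; subst hb
    rw [pvScanA.eq_def, pvMaskLine.eq_def]; simp [h2, ih i d f]
  | case6 rest b hb q h1 h2 ih =>
    intro i d f
    simp only [Bool.not_eq_true] at hb; subst hb
    rw [pvScanA.eq_def, pvMaskLine.eq_def]; simp [ih i d f]
  | case7 rest b hb q h1 h2 h3 ih =>
    intro i d f
    simp only [Bool.not_eq_true] at hb; subst hb
    rw [pvScanA.eq_def, pvMaskLine.eq_def]; simp [h1, h2, h3, ih i d f]
  | case8 c rest b hb h1 h2 q h3 h4 ih =>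
    intro i d f
    simp only [Bool.not_eq_true] at hb; subst hb
    rw [pvScanA.eq_def, pvMaskLine.eq_def]; simp [h1, h2, h3, h4, ih i d f]
  | case9 c rest b hb h1 h2 h3 ih =>
    intro i d f
    simp only [Bool.not_eq_true] at hb; subst hb
    rw [pvScanA.eq_def, pvMaskLine.eq_def]; simp [h1, h2, h3, ih i d f]
  | case10 c rest b hb h1 h2 h3 ih =>
    intro i d f
    simp only [Bool.not_eq_true] at hb; subst hb
    rw [pvScanA.eq_def, pvMaskLine.eq_def]
    simp only [h1, h2, h3, Bool.false_eq_true, if_false]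
    by_cases hc1 : c = '{'
    · simp [hc1, pvCountLine, ih i (d + 1) true]
    · by_cases hc2 : c = '}'
      · by_cases hf : f ∧ d - 1 = 0
        · simp [hc2, hf, pvCountLine]
        · simp [hc2, hf, pvCountLine, ih i (d - 1) f]
      · simp [hc1, hc2, pvCountLine, ih i d f]

-- A's outer loop rewritten to walk the suffix of lines directly
def pvOuterA' : List String → Int → Int → Bool → Option Char → Bool → Option Int
  | [], _, _, _, _, _ => none
  | l :: ls, k, d, f, s, b =>
    match pvScanA l.toList k d f s b with
    | .ret r => some r
    | .cont d' f' s' b' => pvOuterA' ls (k + 1) d' f' s' b'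

theorem pvCountLines_eq_outerA' (ls : List String) :
    ∀ (k d : Int) (f : Bool) (s : Option Char) (b : Bool),
    pvCountLines (pvMaskLines ls s b) k d f = pvOuterA' ls k d f s b := by
  induction ls with
  | nil => intro k d f s b; simp [pvMaskLines, pvCountLines, pvOuterA']
  | cons l ls ih =>
    intro k d f s b
    rw [pvMaskLines, pvOuterA', pvScanA_eq_mask_count]
    rw [pvCountLines]
    cases h : pvCountLine (pvMaskLine l.toList s b).1 d f with
    | none => simp
    | some r => simp only []; exact ih (k + 1) r.1 r.2 _ _

theorem pvOuterA_eq_outerA' (lines : List String) (d : Int) (f : Bool) (s : Option Char) (b : Bool) :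
    ∀ (n : Nat) (a : Int), 0 ≤ a → (lines.length : Int) - a ≤ (n : Int) →
    pvOuterA lines (PySem.List.pyRange a (lines.length : Int) 1) d f s b
      = pvOuterA' (lines.drop a.toNat) a d f s b := by
  intro n
  induction n generalizing d f s b with
  | zero =>
    intro a ha hn
    have hge : (lines.length : Int) ≤ a := by omega
    rw [PySem.List.pyRange_one_eq_nil hge]
    have : lines.length ≤ a.toNat := by omega
    rw [List.drop_eq_nil_of_le this]
    simp [pvOuterA, pvOuterA']
  | succ n ih =>
    intro a ha hn
    by_cases hlt : a < (lines.length : Int)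
    · rw [PySem.List.pyRange_one_cons hlt]
      have hna : a.toNat < lines.length := by omega
      have hget : PySem.List.pyGet? lines a = some lines[a.toNat] :=
        PySem.List.pyGet?_eq_some_getElem lines ha hlt
      rw [pvOuterA, hget]
      rw [List.drop_eq_getElem_cons hna, pvOuterA']
      cases hscan : pvScanA (lines[a.toNat]).toList a d f s b with
      | ret r => simp only [hscan]
      | cont d' f' s' b' =>
        simp only [hscan]
        have h1 : (a + 1).toNat = a.toNat + 1 := by omega
        rw [ih d' f' s' b' (a + 1) (by omega) (by omega), h1]
    · have hge : (lines.length : Int) ≤ a := by omega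
      rw [PySem.List.pyRange_one_eq_nil hge]
      have : lines.length ≤ a.toNat := by omega
      rw [List.drop_eq_nil_of_le this]
      simp [pvOuterA, pvOuterA']

-- ===== VERDICT (by name: the statement is the Claim_ definition above) =====
theorem find_method_end_py_spec : Claim_equal_find_method_end_py := by
  intro lines start_line _ hpre
  have h0 : 0 ≤ start_line := hpre
  unfold Spec_find_method_end_py find_method_end_py find_method_end_py_alt
  rw [PySem.List.slice_from _ h0]
  rw [pvCountLines_eq_outerA']
  exact pvOuterA_eq_outerA' lines 0 false none false lines.length start_line h0 (by omega)
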